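-- pv_equiv track=rewrite | github.com/Sanqiang-Qu/crc_test | CRC_code/Tool/gap_find.py | expand_gap_regions
-- ===== SOURCE A (Python) =====
-- def expand_gap_regions(indices, array_length, extra_gap=0):
--     """
--     扩展连续的索引区域
--
--     参数:
--     indices: 包含gap的索引列表（一维数组）
--     array_length: 数组的总长度（行数或列数）
--     extra_gap: 正整数，用于扩展gap区域的范围
--
--     返回:
--     expanded_regions: 扩展后的区域列表，每个区域为字典，包含:
--         - 'original_start': 原始起始索引
--         - 'original_end': 原始结束索引
--         - 'original_length': 原始长度
--         - 'expanded_start': 扩展后起始索引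
--         - 'expanded_end': 扩展后结束索引
--         - 'expanded_length': 扩展后长度
--     """
--     expanded_regions = {}
--
--     if len(indices) == 0:
--         return expanded_regions
--
--     # 将连续的索引分组
--     groups = []
--     current_group = [indices[0]]
--
--     for i in range(1, len(indices)):
--         if indices[i] == indices[i-1] + 1:
--             current_group.append(indices[i])
--         else:
--             groups.append(current_group)
--             current_group = [indices[i]]
--
--     groups.append(current_group)
--
--     # 处理每个连续区域
--     for idx, group in enumerate(groups):
--         if len(group) > 0:
--             start = group[0]
--             end = group[-1]
--             length = len(group)
--
--             # 扩展并确保不超出边界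
--             new_start = max(0, start - extra_gap)
--             new_end = min(array_length - 1, end + extra_gap)
--             expanded_length = new_end - new_start + 1
--
--             expanded_regions[idx] = {
--                 'original_start': start,
--                 'original_end': end,
--                 'original_length': length,
--                 'expanded_start': new_start,
--                 'expanded_end': new_end,
--                 'expanded_length': expanded_length
--             }
--
--     return expanded_regions
-- ===== SOURCE B (Python) =====
-- def expand_gap_regions(indices, array_length, extra_gap=0):
--     # Runs are located by the adjacency breaks of zip(indices, indices[1:]);
--     # each run's length is recovered arithmetically as end - start + 1.
--     breaks = [(a, b) for a, b in zip(indices, indices[1:]) if b != a + 1]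
--     starts = indices[:1] + [b for _, b in breaks]
--     ends = [a for a, _ in breaks] + indices[-1:]
--     regions = {}
--     for k, (s, e) in enumerate(zip(starts, ends)):
--         ns = max(0, s - extra_gap)
--         ne = min(array_length - 1, e + extra_gap)
--         regions[k] = {
--             'original_start': s,
--             'original_end': e,
--             'original_length': e - s + 1,
--             'expanded_start': ns,
--             'expanded_end': ne,
--             'expanded_length': ne - ns + 1,
--         }
--     return regions
-- ===== Notes on version B (the rewrite author's own statement) =====
-- stated objective: alternative
-- what changed: Instead of accumulating explicit group sublists with a flush-on-break loop, B finds the break positions via zip(indices, indices[1:]), reads run starts and ends directly from those break pairs, and recovers each run's length arithmetically as end - start + 1, never materialising the groups.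
import Mathlib
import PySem

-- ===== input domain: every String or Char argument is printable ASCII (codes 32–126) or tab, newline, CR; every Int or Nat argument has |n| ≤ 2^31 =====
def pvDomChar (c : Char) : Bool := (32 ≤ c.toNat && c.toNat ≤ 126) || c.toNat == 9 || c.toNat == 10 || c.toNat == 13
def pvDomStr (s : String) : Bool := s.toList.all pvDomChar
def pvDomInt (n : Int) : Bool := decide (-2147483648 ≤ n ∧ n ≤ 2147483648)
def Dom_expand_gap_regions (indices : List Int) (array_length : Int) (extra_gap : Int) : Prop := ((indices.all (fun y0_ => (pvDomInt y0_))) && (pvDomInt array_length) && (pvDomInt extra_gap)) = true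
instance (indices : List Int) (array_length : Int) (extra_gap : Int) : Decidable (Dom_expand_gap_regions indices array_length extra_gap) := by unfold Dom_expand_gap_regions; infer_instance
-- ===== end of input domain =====

-- B locates runs via the adjacency breaks of zip(indices, indices[1:]) and recovers each
-- run's length arithmetically, instead of A's flush-on-break accumulation of group sublists.

-- ===== PORT A =====
-- grouping step of A's first loop: state = (groups, current_group, previous element)
def aStep (st : List (List Int) × List Int × Int) (x : Int) : List (List Int) × List Int × Int :=
  if x = st.2.2 + 1 then (st.1, st.2.1 ++ [x], x) else (st.1 ++ [st.2.1], [x], x)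

-- emission step of A's second loop (dict insertion with fresh keys = append)
def aEmit (array_length extra_gap : Int) (out : List (Int × List (String × Int)))
    (gi : Int × List Int) : List (Int × List (String × Int)) :=
  if gi.2.length > 0 then
    let start := gi.2.headD 0
    let end_ := gi.2.getLastD 0
    let length : Int := gi.2.length
    let new_start := max 0 (start - extra_gap)
    let new_end := min (array_length - 1) (end_ + extra_gap)
    out ++ [(gi.1, [("original_start", start), ("original_end", end_),
      ("original_length", length), ("expanded_start", new_start),
      ("expanded_end", new_end), ("expanded_length", new_end - new_start + 1)])]
  else out

def expand_gap_regions (indices : List Int) (array_length : Int) (extra_gap : Int) :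
    List (Int × List (String × Int)) :=
  match indices with
  | [] => []
  | i0 :: rest =>
    let st := rest.foldl aStep ([], [i0], i0)
    let groups := st.1 ++ [st.2.1]
    (PySem.List.enumerate groups 0).foldl (fun out kg => aEmit array_length extra_gap out kg) []

-- ===== PORT B =====
-- emission step of B's loop over enumerate(zip(starts, ends))
def bEmit (array_length extra_gap : Int) (out : List (Int × List (String × Int)))
    (kse : Int × Int × Int) : List (Int × List (String × Int)) :=
  let s := kse.2.1
  let e := kse.2.2
  let ns := max 0 (s - extra_gap)
  let ne := min (array_length - 1) (e + extra_gap)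
  out ++ [(kse.1, [("original_start", s), ("original_end", e),
    ("original_length", e - s + 1), ("expanded_start", ns),
    ("expanded_end", ne), ("expanded_length", ne - ns + 1)])]

def expand_gap_regions_alt (indices : List Int) (array_length : Int) (extra_gap : Int) :
    List (Int × List (String × Int)) :=
  let breaks := (indices.zip indices.tail).filter (fun ab => ab.2 != ab.1 + 1)
  let starts := indices.take 1 ++ breaks.map Prod.snd
  let ends := breaks.map Prod.fst ++ indices.drop (indices.length - 1)
  (PySem.List.enumerate (starts.zip ends) 0).foldl
    (fun out kse => bEmit array_length extra_gap out kse) []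

-- ===== PRECONDITION & SPEC =====
def Spec_expand_gap_regions (indices : List Int) (array_length : Int) (extra_gap : Int) (out : List (Int × List (String × Int))) : Prop := out = expand_gap_regions_alt indices array_length extra_gap
instance (indices : List Int) (array_length : Int) (extra_gap : Int) (out : List (Int × List (String × Int))) : Decidable (Spec_expand_gap_regions indices array_length extra_gap out) := by unfold Spec_expand_gap_regions; infer_instance

-- ===== CLAIM (what is proved, stated in full; the proofs are below) =====
def Claim_equal_expand_gap_regions : Prop := ∀ (indices : List Int) (array_length : Int) (extra_gap : Int), Dom_expand_gap_regions indices array_length extra_gap → Spec_expand_gap_regions indices array_length extra_gap (expand_gap_regions indices array_length extra_gap)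

-- ===== LEMMAS AND PROOFS =====

-- maximal consecutive run continuing a previous element p
def takeRun (p : Int) : List Int → List Int × List Int
  | [] => ([], [])
  | y :: ys => if y = p + 1 then ((takeRun y ys).1.cons y, (takeRun y ys).2) else ([], y :: ys)

theorem takeRun_snd_length (p : Int) (l : List Int) : (takeRun p l).2.length ≤ l.length := by
  induction l generalizing p with
  | nil => simp [takeRun]
  | cons y ys ih =>
    simp only [takeRun]
    split
    · exact le_trans (ih y) (Nat.le_succ _)
    · simp

-- the maximal consecutive runs of a list
def runs : List Int → List (List Int)
  | [] => []
  | x :: xs => (x :: (takeRun x xs).1) :: runs (takeRun x xs).2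
termination_by l => l.length
decreasing_by simpa using Nat.lt_succ_of_le (takeRun_snd_length x xs)

-- the grouping A performs with an explicit accumulator
def runsAux (cur : List Int) (prev : Int) : List Int → List (List Int)
  | [] => [cur]
  | x :: xs => if x = prev + 1 then runsAux (cur ++ [x]) x xs else cur :: runsAux [x] x xs

theorem foldA_runsAux (xs : List Int) (groups : List (List Int)) (cur : List Int) (prev : Int) :
    (xs.foldl aStep (groups, cur, prev)).1 ++ [(xs.foldl aStep (groups, cur, prev)).2.1]
      = groups ++ runsAux cur prev xs := by
  induction xs generalizing groups cur prev with
  | nil => simp [runsAux]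
  | cons x xs ih =>
    simp only [List.foldl_cons, aStep, runsAux]
    split
    · exact ih groups (cur ++ [x]) x
    · rw [ih (groups ++ [cur]) [x] x]; simp

theorem runsAux_eq (xs : List Int) (cur : List Int) (prev : Int) :
    runsAux cur prev xs = (cur ++ (takeRun prev xs).1) :: runs (takeRun prev xs).2 := by
  induction xs generalizing cur prev with
  | nil => simp [runsAux, takeRun, runs]
  | cons x xs ih =>
    simp only [runsAux, takeRun]
    split
    · rw [ih (cur ++ [x]) x]; simp
    · rw [ih [x] x]
      rw [runs]
      simp

theorem groups_eq_runs (i0 : Int) (rest : List Int) :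
    (rest.foldl aStep ([], [i0], i0)).1 ++ [(rest.foldl aStep ([], [i0], i0)).2.1]
      = runs (i0 :: rest) := by
  rw [foldA_runsAux, runsAux_eq, runs]
  simp

-- break pairs of the adjacency zip
def brkList (p : Int) (l : List Int) : List (Int × Int) :=
  ((p :: l).zip l).filter (fun ab => ab.2 != ab.1 + 1)

theorem brkList_cons_pos (p y : Int) (t : List Int) (h : y = p + 1) :
    brkList p (y :: t) = brkList y t := by
  simp [brkList, h]

theorem brkList_cons_neg (p y : Int) (t : List Int) (h : y ≠ p + 1) :
    brkList p (y :: t) = (p, y) :: brkList y t := by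
  simp [brkList, h]

theorem takeRun_cons_pos (p y : Int) (t : List Int) (h : y = p + 1) :
    takeRun p (y :: t) = (y :: (takeRun y t).1, (takeRun y t).2) := by
  simp [takeRun, h]

theorem takeRun_cons_neg (p y : Int) (t : List Int) (h : y ≠ p + 1) :
    takeRun p (y :: t) = ([], y :: t) := by
  simp [takeRun, h]

theorem getLastD_cons_cons (p y : Int) (t : List Int) (d : Int) :
    (p :: y :: t).getLastD d = (y :: t).getLastD d := by
  simp only [List.getLastD_cons]

theorem starts_eq (l : List Int) (p : Int) :
    p :: (brkList p l).map Prod.snd = (runs (p :: l)).map (fun g => g.headD 0) := by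
  induction l generalizing p with
  | nil => simp [brkList, runs, takeRun]
  | cons y t ih =>
    by_cases h : y = p + 1
    · rw [brkList_cons_pos p y t h, runs, takeRun_cons_pos p y t h]
      have ihy := ih y
      rw [runs] at ihy
      simp only [List.map_cons, List.headD_cons] at ihy ⊢
      injection ihy with _ htl
      rw [htl]
    · rw [brkList_cons_neg p y t h, runs, takeRun_cons_neg p y t h]
      simp only [List.map_cons, List.headD_cons]
      rw [← ih y]

theorem ends_eq (l : List Int) (p : Int) :
    (brkList p l).map Prod.fst ++ [(p :: l).getLastD 0]
      = (runs (p :: l)).map (fun g => g.getLastD 0) := by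
  induction l generalizing p with
  | nil => simp [brkList, runs, takeRun]
  | cons y t ih =>
    by_cases h : y = p + 1
    · rw [brkList_cons_pos p y t h, runs, takeRun_cons_pos p y t h]
      simp only [List.map_cons]
      rw [getLastD_cons_cons, getLastD_cons_cons]
      have ihy := ih y
      rw [runs] at ihy
      simp only [List.map_cons] at ihy
      exact ihy
    · rw [brkList_cons_neg p y t h, runs, takeRun_cons_neg p y t h]
      simp only [List.map_cons, List.cons_append]
      rw [getLastD_cons_cons, ih y]
      simp

-- every run is an arithmetic progression with step 1: last = first + length - 1
theorem takeRun_getLastD (p : Int) (l : List Int) :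
    (p :: (takeRun p l).1).getLastD 0 = p + (takeRun p l).1.length := by
  induction l generalizing p with
  | nil => simp [takeRun]
  | cons y ys ih =>
    by_cases h : y = p + 1
    · rw [takeRun_cons_pos p y ys h, getLastD_cons_cons, ih y]
      simp [h]
      ring
    · rw [takeRun_cons_neg p y ys h]
      simp

theorem runs_consec (xs : List Int) : ∀ g ∈ runs xs, g.getLastD 0 = g.headD 0 + g.length - 1 := by
  induction xs using runs.induct with
  | case1 => simp [runs]
  | case2 x xs ih =>
    rw [runs]
    intro g hg
    rcases List.mem_cons.mp hg with h | h
    · subst h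
      rw [takeRun_getLastD]
      simp
      ring
    · exact ih g h

-- emission over the groups equals emission over the (start, end) pairs
theorem emit_eq (al eg : Int) (gs : List (List Int)) (n : Int)
    (hc : ∀ g ∈ gs, g.getLastD 0 = g.headD 0 + g.length - 1)
    (hne : ∀ g ∈ gs, g ≠ []) (out : List (Int × List (String × Int))) :
    (PySem.List.enumerate gs n).foldl (fun o kg => aEmit al eg o kg) out
      = (PySem.List.enumerate (gs.map (fun g => (g.headD 0, g.getLastD 0))) n).foldl
          (fun o kse => bEmit al eg o kse) out := by
  induction gs generalizing n out with
  | nil => simp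
  | cons g gs ih =>
    rw [List.map_cons, PySem.List.enumerate_cons, PySem.List.enumerate_cons]
    simp only [List.foldl_cons]
    have hgne := hne g (by simp)
    have hlen : 0 < g.length := List.length_pos_iff.mpr hgne
    have hstep : aEmit al eg out (n, g) = bEmit al eg out (n, g.headD 0, g.getLastD 0) := by
      simp only [aEmit, bEmit]
      rw [if_pos hlen]
      have := hc g (by simp)
      simp only [this]
      ring_nf
    rw [hstep]
    exact ih (n + 1) (fun g hg => hc g (by simp [hg])) (fun g hg => hne g (by simp [hg]))
      (bEmit al eg out (n, g.headD 0, g.getLastD 0))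

theorem drop_length_sub_one (i0 : Int) (rest : List Int) :
    (i0 :: rest).drop ((i0 :: rest).length - 1) = [(i0 :: rest).getLastD 0] := by
  induction rest generalizing i0 with
  | nil => simp
  | cons y t ih =>
    have := ih y
    simpa [List.getLastD_cons] using this

theorem main_eq (indices : List Int) (al eg : Int) :
    expand_gap_regions indices al eg = expand_gap_regions_alt indices al eg := by
  cases indices with
  | nil => rfl
  | cons i0 rest =>
    show (PySem.List.enumerate ((rest.foldl aStep ([], [i0], i0)).1
        ++ [(rest.foldl aStep ([], [i0], i0)).2.1]) 0).foldl (fun o kg => aEmit al eg o kg) []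
      = _
    rw [groups_eq_runs]
    unfold expand_gap_regions_alt
    have hzip : ((i0 :: rest).zip (i0 :: rest).tail).filter (fun ab => ab.2 != ab.1 + 1)
        = brkList i0 rest := rfl
    simp only [hzip]
    rw [drop_length_sub_one]
    have hs := starts_eq rest i0
    have he := ends_eq rest i0
    have hzip2 : (((i0 :: rest).take 1 ++ (brkList i0 rest).map Prod.snd).zip
          ((brkList i0 rest).map Prod.fst ++ [(i0 :: rest).getLastD 0]))
        = ((runs (i0 :: rest)).map (fun g => g.headD 0)).zip
            ((runs (i0 :: rest)).map (fun g => g.getLastD 0)) := by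
      rw [show (i0 :: rest).take 1 = [i0] from rfl, ← hs, ← he]
      rfl
    rw [hzip2, List.zip_map']
    exact emit_eq al eg (runs (i0 :: rest)) 0 (runs_consec _)
      (by
        intro g hg
        -- every run is nonempty by construction
        revert hg
        generalize (i0 :: rest) = l
        induction l using runs.induct with
        | case1 => simp [runs]
        | case2 x xs ih =>
          rw [runs]
          intro hg
          rcases List.mem_cons.mp hg with h | h
          · subst h; simp
          · exact ih h) []

-- ===== VERDICT (by name: the statement is the Claim_ definition above) =====
theorem expand_gap_regions_spec : Claim_equal_expand_gap_regions := by
  intro indices al eg _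
  exact main_eq indices al eg
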